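-- pv_equiv track=rewrite | github.com/RomanPLayGM/Education | dssdsdssdss.py | gimme
-- ===== SOURCE A (Python) =====
-- def gimme(input_array):
--     count = 0
--     t = []
--     for o in input_array:
--         t.append(o)
--     u = input_array
--     last_item = len(u) - 1
--     for z in range(0, last_item):
--         for x in range(0, last_item):
--             if u[x] > u[x + 1]:
--                 u[x], u[x + 1] = u[x + 1], u[x]
--     for i in u:
--         if u[0] < i < u[len(u)-1]:
--             y = i
--         count += 1
--     l = t.index(y)
--     return l
-- ===== SOURCE B (Python) =====
-- def gimme(input_array):
--     mn = min(input_array)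
--     mx = max(input_array)
--     y = max(v for v in input_array if mn < v < mx)
--     return input_array.index(y)
-- ===== Notes on version B (the rewrite author's own statement) =====
-- stated objective: faster
-- what changed: Replaces the in-place bubble sort plus scan of the sorted list by a direct min/max computation and a max over the strictly-between values, then one index lookup.
import Mathlib
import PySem

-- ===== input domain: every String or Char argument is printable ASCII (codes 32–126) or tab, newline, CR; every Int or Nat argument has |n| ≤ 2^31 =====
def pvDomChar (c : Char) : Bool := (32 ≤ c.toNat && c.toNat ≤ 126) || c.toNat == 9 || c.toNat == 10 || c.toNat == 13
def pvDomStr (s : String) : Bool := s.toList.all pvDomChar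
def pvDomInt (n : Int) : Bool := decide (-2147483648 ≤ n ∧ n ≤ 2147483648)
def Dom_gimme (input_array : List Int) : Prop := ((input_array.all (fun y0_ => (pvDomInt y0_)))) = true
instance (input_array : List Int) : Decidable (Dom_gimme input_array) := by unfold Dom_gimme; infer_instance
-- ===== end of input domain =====

-- B replaces A's in-place bubble sort (A mutates its argument; only the RETURN value is
-- compared here) + scan of the sorted list by one min/max pass and a max over the
-- strictly-between values; measurably faster (O(n) vs O(n^2)).

-- ===== PORT A =====
-- one Python swap step: if u[x] > u[x+1] then swap them
def swapStep (u : List Int) (x : Nat) : List Int :=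
  match u[x]?, u[x+1]? with
  | some a, some b => if a > b then (u.set x b).set (x+1) a else u
  | _, _ => u

def gimme (input_array : List Int) : Int :=
  let t := input_array   -- the copy made by the first loop
  let last_item := input_array.length - 1
  -- the two nested range(0, last_item) loops of bubble swaps
  let u := (List.range last_item).foldl
      (fun w _ => (List.range last_item).foldl swapStep w) input_array
  -- for i in u: if u[0] < i < u[len(u)-1]: y = i   (y starts unbound = none)
  let y := u.foldl (fun y i =>
      match PySem.List.pyGet? u 0, PySem.List.pyGet? u ((u.length : Int) - 1) with
      | some a, some b => if a < i ∧ i < b then some i else y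
      | _, _ => y) (none : Option Int)
  match y with
  | some v => (PySem.List.index? t v).getD 0   -- index always succeeds when y was set
  | none => 0   -- unreachable under Pre_ (Python NameError)

-- ===== PORT B =====
def gimme_alt (input_array : List Int) : Int :=
  match input_array with
  | [] => 0   -- unreachable under Pre_ (Python min([]) raises)
  | h :: tl =>
    let mn := tl.foldl min h
    let mx := tl.foldl max h
    match input_array.filter (fun v => decide (mn < v) && decide (v < mx)) with
    | [] => 0   -- unreachable under Pre_ (Python max of empty raises)
    | c :: cs => (PySem.List.index? input_array (cs.foldl max c)).getD 0

-- ===== PRECONDITION & SPEC =====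
-- Pre_: some element has a strictly smaller and a strictly larger element (i.e. a value
-- strictly between min and max exists); exactly where Python A returns (otherwise A's y
-- is never assigned and A raises NameError, or A raises on the empty list).
def Pre_gimme (input_array : List Int) : Prop :=
  (input_array.any (fun v =>
      input_array.any (fun a => decide (a < v)) &&
      input_array.any (fun b => decide (v < b)))) = true
instance (input_array : List Int) : Decidable (Pre_gimme input_array) := by
  unfold Pre_gimme; infer_instance
def pvWitness_gimme : List Int := [1, 3, 2]

def Spec_gimme (input_array : List Int) (out : Int) : Prop := out = gimme_alt input_array
instance (input_array : List Int) (out : Int) : Decidable (Spec_gimme input_array out) := by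
  unfold Spec_gimme; infer_instance

-- ===== CLAIM (what is proved, stated in full; the proofs are below) =====
def Claim_equal_gimme : Prop := ∀ (input_array : List Int), Dom_gimme input_array →
  Pre_gimme input_array → Spec_gimme input_array (gimme input_array)

-- ===== LEMMAS AND PROOFS =====

-- one left-to-right bubble pass, structurally
def bpass : List Int → List Int
  | [] => []
  | [a] => [a]
  | a :: b :: r => if a > b then b :: bpass (a :: r) else a :: bpass (b :: r)

theorem swapStep_cons_succ (h : Int) (t : List Int) (x : Nat) :
    swapStep (h :: t) (x + 1) = h :: swapStep t x := by
  unfold swapStep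
  cases hx : t[x]? <;> cases hy : t[x + 1]? <;>
    simp [hx, hy]
  split <;> simp

theorem foldl_swap_map_succ (idxs : List Nat) :
    ∀ (h : Int) (t : List Int),
      (idxs.map Nat.succ).foldl swapStep (h :: t) = h :: idxs.foldl swapStep t := by
  induction idxs with
  | nil => intro h t; simp
  | cons i is ih =>
      intro h t
      simp only [List.map_cons, List.foldl_cons]
      rw [show i.succ = i + 1 from rfl, swapStep_cons_succ, ih]

theorem swapStep_zero (a b : Int) (r : List Int) :
    swapStep (a :: b :: r) 0 = if a > b then b :: a :: r else a :: b :: r := by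
  simp [swapStep, List.set]

theorem pass_eq : ∀ u : List Int,
    (List.range (u.length - 1)).foldl swapStep u = bpass u := by
  intro u
  induction u using bpass.induct with
  | case1 => simp [bpass]
  | case2 a => simp [bpass]
  | case3 a b r hab ih =>
      simp only [List.length_cons, Nat.add_sub_cancel, List.range_succ_eq_map,
        List.foldl_cons, swapStep_zero, if_pos hab, foldl_swap_map_succ]
      rw [bpass]
      simp only [if_pos hab]
      simpa using ih
  | case4 a b r hab ih =>
      simp only [List.length_cons, Nat.add_sub_cancel, List.range_succ_eq_map,
        List.foldl_cons, swapStep_zero, if_neg hab, foldl_swap_map_succ]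
      rw [bpass]
      simp only [if_neg hab]
      simpa using ih

theorem bpass_perm : ∀ l : List Int, List.Perm (bpass l) l := by
  intro l
  induction l using bpass.induct with
  | case1 => simp [bpass]
  | case2 a => simp [bpass]
  | case3 a b r hab ih =>
      rw [bpass]; simp only [if_pos hab]
      exact ((ih.cons b).trans (List.Perm.swap a b r))
  | case4 a b r hab ih =>
      rw [bpass]; simp only [if_neg hab]
      exact ih.cons a

theorem bpass_length (l : List Int) : (bpass l).length = l.length :=
  (bpass_perm l).length_eq

theorem bpass_split : ∀ l : List Int, l ≠ [] →
    ∃ s m, bpass l = s ++ [m] ∧ ∀ x ∈ l, x ≤ m := by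
  intro l
  induction l using bpass.induct with
  | case1 => intro h; exact absurd rfl h
  | case2 a => intro _; exact ⟨[], a, by simp [bpass]⟩
  | case3 a b r hab ih =>
      intro _
      obtain ⟨s, m, hs, hm⟩ := ih (by simp)
      have ham : a ≤ m := hm a (by simp)
      refine ⟨b :: s, m, by rw [bpass]; simp [if_pos hab, hs], ?_⟩
      intro x hx
      simp only [List.mem_cons] at hx
      rcases hx with rfl | rfl | hx
      · exact ham
      · exact le_trans (le_of_lt hab) ham
      · exact hm x (by simp [hx])
  | case4 a b r hab ih =>
      intro _
      obtain ⟨s, m, hs, hm⟩ := ih (by simp)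
      have hbm : b ≤ m := hm b (by simp)
      refine ⟨a :: s, m, by rw [bpass]; simp [if_neg hab, hs], ?_⟩
      intro x hx
      simp only [List.mem_cons] at hx
      rcases hx with rfl | rfl | hx
      · exact le_trans (not_lt.1 hab) hbm
      · exact hbm
      · exact hm x (by simp [hx])

theorem bpass_append_max : ∀ (l : List Int) (m : Int), (∀ x ∈ l, x ≤ m) →
    bpass (l ++ [m]) = bpass l ++ [m] := by
  intro l
  induction l using bpass.induct with
  | case1 => intro m _; simp [bpass]
  | case2 a =>
      intro m hm
      have ha : ¬ a > m := not_lt.2 (hm a (by simp))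
      simp [bpass, if_neg ha]
  | case3 a b r hab ih =>
      intro m hm
      have h1 : (a :: b :: r) ++ [m] = a :: b :: (r ++ [m]) := by simp
      rw [h1, bpass, if_pos hab, bpass, if_pos hab,
        show a :: (r ++ [m]) = (a :: r) ++ [m] by simp,
        ih m (fun x hx => hm x (by simp only [List.mem_cons] at hx ⊢; tauto))]
      simp
  | case4 a b r hab ih =>
      intro m hm
      have h1 : (a :: b :: r) ++ [m] = a :: b :: (r ++ [m]) := by simp
      rw [h1, bpass, if_neg hab, bpass, if_neg hab,
        show b :: (r ++ [m]) = (b :: r) ++ [m] by simp,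
        ih m (fun x hx => hm x (by simp only [List.mem_cons] at hx ⊢; tauto))]
      simp

theorem iter_perm (n : Nat) (l : List Int) : List.Perm (bpass^[n] l) l := by
  induction n with
  | zero => simp
  | succ n ih =>
      rw [Function.iterate_succ_apply']
      exact (bpass_perm _).trans ih

theorem iter_append_max : ∀ (n : Nat) (s : List Int) (m : Int), (∀ x ∈ s, x ≤ m) →
    bpass^[n] (s ++ [m]) = bpass^[n] s ++ [m] := by
  intro n
  induction n with
  | zero => intro s m _; simp
  | succ n ih =>
      intro s m hm
      rw [Function.iterate_succ_apply, Function.iterate_succ_apply,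
        bpass_append_max s m hm]
      exact ih (bpass s) m (fun x hx => hm x ((bpass_perm s).mem_iff.1 hx))

theorem iter_sorted : ∀ (n : Nat) (l : List Int), l.length ≤ n + 1 →
    List.Pairwise (· ≤ ·) (bpass^[n] l) := by
  intro n
  induction n with
  | zero =>
      intro l hl
      match l, hl with
      | [], _ => exact List.Pairwise.nil
      | [a], _ => exact List.pairwise_singleton _ _
  | succ n ih =>
      intro l hl
      rcases eq_or_ne l [] with rfl | hne
      · rw [Function.iterate_succ_apply]
        exact ih (bpass []) (by simp [bpass])
      · obtain ⟨s, m, hs, hm⟩ := bpass_split l hne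
        have hbnd : ∀ x ∈ s, x ≤ m := by
          intro x hx
          exact hm x ((bpass_perm l).mem_iff.1 (hs ▸ List.mem_append_left [m] hx))
        have hlen : s.length ≤ n + 1 := by
          have h1 : (s ++ [m]).length = l.length := hs ▸ bpass_length l
          simp at h1; omega
        rw [Function.iterate_succ_apply, hs, iter_append_max n s m hbnd]
        have hss := ih s hlen
        have hmem : ∀ x ∈ bpass^[n] s, x ≤ m :=
          fun x hx => hbnd x ((iter_perm n s).mem_iff.1 hx)
        rw [List.pairwise_append]
        exact ⟨hss, by simp, by intro x hx y hy; simp at hy; subst hy; exact hmem x hx⟩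

theorem iter_eq : ∀ (k : Nat) (n : Nat) (w : List Int), w.length - 1 = n →
    (fun v => (List.range n).foldl swapStep v)^[k] w = bpass^[k] w := by
  intro k
  induction k with
  | zero => intro n w _; rfl
  | succ k ih =>
      intro n w hn
      rw [Function.iterate_succ_apply, Function.iterate_succ_apply]
      have h1 : (List.range n).foldl swapStep w = bpass w := by
        rw [← hn]; exact pass_eq w
      rw [h1]
      exact ih n (bpass w) (by rw [bpass_length, hn])

theorem foldl_range_const {α : Type} (g : α → α) (k : Nat) (s : α) :
    (List.range k).foldl (fun v _ => g v) s = g^[k] s := by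
  induction k generalizing s with
  | zero => simp
  | succ k ih =>
      rw [List.range_succ, List.foldl_append, ih, List.foldl_cons, List.foldl_nil]
      exact (Function.iterate_succ_apply' g k s).symm

-- foldl min / max compute the minimum / maximum of h :: t
theorem foldl_max_spec : ∀ (t : List Int) (h : Int),
    t.foldl max h ∈ h :: t ∧ ∀ x ∈ h :: t, x ≤ t.foldl max h := by
  intro t
  induction t with
  | nil => intro h; simp
  | cons c cs ih =>
      intro h
      obtain ⟨hmem, hle⟩ := ih (max h c)
      constructor
      · simp only [List.foldl_cons]
        rcases List.mem_cons.1 hmem with he | hmem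
        · rcases max_choice h c with hc | hc <;> rw [he, hc] <;> simp
        · simp [hmem]
      · intro x hx
        simp only [List.foldl_cons]
        rcases List.mem_cons.1 hx with rfl | hx
        · exact le_trans (le_max_left x c) (hle _ (by simp))
        · rcases List.mem_cons.1 hx with rfl | hx
          · exact le_trans (le_max_right h x) (hle _ (by simp))
          · exact hle x (by simp [hx])

theorem foldl_min_spec : ∀ (t : List Int) (h : Int),
    t.foldl min h ∈ h :: t ∧ ∀ x ∈ h :: t, t.foldl min h ≤ x := by
  intro t
  induction t with
  | nil => intro h; simp
  | cons c cs ih =>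
      intro h
      obtain ⟨hmem, hle⟩ := ih (min h c)
      constructor
      · simp only [List.foldl_cons]
        rcases List.mem_cons.1 hmem with he | hmem
        · rcases min_choice h c with hc | hc <;> rw [he, hc] <;> simp
        · simp [hmem]
      · intro x hx
        simp only [List.foldl_cons]
        rcases List.mem_cons.1 hx with rfl | hx
        · exact le_trans (hle _ (by simp)) (min_le_left x c)
        · rcases List.mem_cons.1 hx with rfl | hx
          · exact le_trans (hle _ (by simp)) (min_le_right h x)
          · exact hle x (by simp [hx])

-- the "y = last qualifying element" loop, on a sorted list, yields the max qualifier
theorem lastFind_spec (P : Int → Prop) [DecidablePred P] :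
    ∀ (u : List Int), List.Pairwise (· ≤ ·) u → ∀ (a : Option Int),
      ((∃ x ∈ u, P x) →
        ∃ m, u.foldl (fun y i => if P i then some i else y) a = some m ∧
          m ∈ u ∧ P m ∧ ∀ x ∈ u, P x → x ≤ m) ∧
      ((¬ ∃ x ∈ u, P x) → u.foldl (fun y i => if P i then some i else y) a = a) := by
  intro u
  induction u with
  | nil => intro _ a; refine ⟨?_, fun _ => rfl⟩; rintro ⟨x, hx, _⟩; simp at hx
  | cons h t ih =>
      intro hs a
      have hsc := List.pairwise_cons.1 hs
      obtain ⟨ih1, ih2⟩ := ih hsc.2 (if P h then some h else a)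
      constructor
      · intro hex0
        by_cases hex : ∃ x ∈ t, P x
        · obtain ⟨m, hm, hmem, hpm, hle⟩ := ih1 hex
          refine ⟨m, by simpa using hm, by simp [hmem], hpm, ?_⟩
          intro x hx hpx
          rcases List.mem_cons.1 hx with rfl | hx
          · exact hsc.1 m hmem
          · exact hle x hx hpx
        · by_cases hph : P h
          · refine ⟨h, ?_, by simp, hph, ?_⟩
            · have := ih2 hex
              simp only [List.foldl_cons]
              rw [this]; simp [hph]
            · intro x hx hpx
              rcases List.mem_cons.1 hx with rfl | hx
              · exact le_refl x
              · exact absurd ⟨x, hx, hpx⟩ hex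
          · obtain ⟨x, hx, hpx⟩ := hex0
            rcases List.mem_cons.1 hx with rfl | hx
            · exact absurd hpx hph
            · exact absurd ⟨x, hx, hpx⟩ hex
      · rintro hno
        have hph : ¬ P h := fun hp => hno ⟨h, by simp, hp⟩
        have hnt : ¬ ∃ x ∈ t, P x := fun ⟨x, hx, hp⟩ => hno ⟨x, by simp [hx], hp⟩
        have := ih2 hnt
        simp only [List.foldl_cons]
        rw [this]; simp [hph]

theorem pyGet?_len_sub_one (u : List Int) (h : u ≠ []) :
    PySem.List.pyGet? u ((u.length : Int) - 1) = u.getLast? := by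
  have h0 : 0 < u.length := by cases u with | nil => exact absurd rfl h | cons _ _ => simp
  rw [PySem.List.pyGet?_of_nonneg u (by omega)]
  rw [List.getLast?_eq_getElem?]
  have ht : ((u.length : Int) - 1).toNat = u.length - 1 := by omega
  rw [ht]

theorem pairwise_le_getLast : ∀ (u : List Int) (h : u ≠ []),
    List.Pairwise (· ≤ ·) u → ∀ x ∈ u, x ≤ u.getLast h := by
  intro u
  induction u with
  | nil => intro h; exact absurd rfl h
  | cons c cs ih =>
      intro _ hp x hx
      rcases eq_or_ne cs [] with rfl | hcs
      · simp only [List.mem_singleton] at hx; subst hx; simp [List.getLast]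
      · rw [List.getLast_cons hcs]
        obtain ⟨hc, hcs'⟩ := List.pairwise_cons.1 hp
        rcases List.mem_cons.1 hx with rfl | hx
        · exact hc _ (List.getLast_mem hcs)
        · exact ih hcs hcs' x hx

-- gimme, with the bubble loops replaced by their value bpass^[n] and head/last resolved
theorem gimme_closed (l : List Int) (uh lst : Int)
    (hne : bpass^[l.length - 1] l ≠ [])
    (hh : (bpass^[l.length - 1] l).head? = some uh)
    (hl : (bpass^[l.length - 1] l).getLast? = some lst) :
    gimme l = (match (bpass^[l.length - 1] l).foldl
        (fun y i => if uh < i ∧ i < lst then some i else y) (none : Option Int) with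
      | some v => (PySem.List.index? l v).getD 0
      | none => 0) := by
  simp only [gimme]
  rw [foldl_range_const, iter_eq (l.length - 1) (l.length - 1) l rfl]
  have h0 : PySem.List.pyGet? (bpass^[l.length - 1] l) 0 = some uh := by
    rw [PySem.List.pyGet?_zero, ← List.head?_eq_getElem?]; exact hh
  have h1 : PySem.List.pyGet? (bpass^[l.length - 1] l)
      (((bpass^[l.length - 1] l).length : Int) - 1) = some lst := by
    rw [pyGet?_len_sub_one _ hne]; exact hl
  simp only [h0, h1]

theorem gimme_main (h : Int) (tl : List Int) (v a b : Int)
    (hvl : v ∈ h :: tl) (hal : a ∈ h :: tl) (hbl : b ∈ h :: tl)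
    (hav : a < v) (hvb : v < b) :
    gimme (h :: tl) = gimme_alt (h :: tl) := by
  have hlen : (h :: tl).length = tl.length + 1 := by simp
  have hperm : List.Perm (bpass^[(h :: tl).length - 1] (h :: tl)) (h :: tl) :=
    iter_perm _ _
  have hsort : List.Pairwise (· ≤ ·) (bpass^[(h :: tl).length - 1] (h :: tl)) :=
    iter_sorted _ _ (by omega)
  have hune : bpass^[(h :: tl).length - 1] (h :: tl) ≠ [] := by
    intro h0
    have := hperm.length_eq
    rw [h0] at this; simp at this
  obtain ⟨uh, ut, huc⟩ := List.exists_cons_of_ne_nil hune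
  obtain ⟨hmn_mem, hmn_le⟩ := foldl_min_spec tl h
  obtain ⟨hmx_mem, hmx_le⟩ := foldl_max_spec tl h
  have hh : (bpass^[(h :: tl).length - 1] (h :: tl)).head? = some uh := by
    rw [huc]; rfl
  have hlq : (bpass^[(h :: tl).length - 1] (h :: tl)).getLast? =
      some ((bpass^[(h :: tl).length - 1] (h :: tl)).getLast hune) :=
    List.getLast?_eq_some_getLast hune
  -- head of the sorted list is the minimum, its last element the maximum
  have huh_min : uh = tl.foldl min h := by
    have h1 : ∀ x ∈ bpass^[(h :: tl).length - 1] (h :: tl), uh ≤ x := by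
      intro x hx
      rw [huc] at hx
      rcases List.mem_cons.1 hx with rfl | hx
      · exact le_refl x
      · rw [huc] at hsort
        exact (List.pairwise_cons.1 hsort).1 x hx
    refine le_antisymm (h1 _ (hperm.mem_iff.2 hmn_mem)) (hmn_le uh ?_)
    exact hperm.mem_iff.1 (by rw [huc]; simp)
  have hlst_max : (bpass^[(h :: tl).length - 1] (h :: tl)).getLast hune = tl.foldl max h := by
    refine le_antisymm (hmx_le _ (hperm.mem_iff.1 (List.getLast_mem hune))) ?_
    exact pairwise_le_getLast _ hune hsort _ (hperm.mem_iff.2 hmx_mem)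
  -- A's y is the maximum strictly-between element
  have hex : ∃ x ∈ bpass^[(h :: tl).length - 1] (h :: tl),
      tl.foldl min h < x ∧ x < tl.foldl max h :=
    ⟨v, hperm.mem_iff.2 hvl,
      lt_of_le_of_lt (hmn_le a hal) hav, lt_of_lt_of_le hvb (hmx_le b hbl)⟩
  obtain ⟨m, hfold, hm_mem, hm_P, hm_max⟩ :=
    (lastFind_spec (fun i => tl.foldl min h < i ∧ i < tl.foldl max h)
      _ hsort none).1 hex
  -- B's candidate list is nonempty and its max equals m
  have hvfilt : v ∈ (h :: tl).filter
      (fun x => decide (tl.foldl min h < x) && decide (x < tl.foldl max h)) := by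
    rw [List.mem_filter]
    refine ⟨hvl, ?_⟩
    simp only [Bool.and_eq_true, decide_eq_true_eq]
    exact ⟨lt_of_le_of_lt (hmn_le a hal) hav, lt_of_lt_of_le hvb (hmx_le b hbl)⟩
  obtain ⟨c, cs, hfc⟩ : ∃ c cs, (h :: tl).filter
      (fun x => decide (tl.foldl min h < x) && decide (x < tl.foldl max h)) = c :: cs := by
    cases hf : (h :: tl).filter
        (fun x => decide (tl.foldl min h < x) && decide (x < tl.foldl max h)) with
    | nil => rw [hf] at hvfilt; cases hvfilt
    | cons c cs => exact ⟨c, cs, rfl⟩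
  obtain ⟨hy_mem, hy_le⟩ := foldl_max_spec cs c
  have hyB_filt : cs.foldl max c ∈ (h :: tl).filter
      (fun x => decide (tl.foldl min h < x) && decide (x < tl.foldl max h)) := by
    rw [hfc]; exact hy_mem
  have hyB_prop := List.mem_filter.1 hyB_filt
  simp only [Bool.and_eq_true, decide_eq_true_eq] at hyB_prop
  have hmeq : m = cs.foldl max c := by
    refine le_antisymm ?_ ?_
    · have : m ∈ (h :: tl).filter
          (fun x => decide (tl.foldl min h < x) && decide (x < tl.foldl max h)) := by
        rw [List.mem_filter]
        refine ⟨hperm.mem_iff.1 hm_mem, ?_⟩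
        simp only [Bool.and_eq_true, decide_eq_true_eq]
        exact hm_P
      rw [hfc] at this
      exact hy_le m this
    · exact hm_max _ (hperm.mem_iff.2 hyB_prop.1) hyB_prop.2
  -- assemble both sides
  rw [gimme_closed (h :: tl) uh ((bpass^[(h :: tl).length - 1] (h :: tl)).getLast hune)
    hune hh hlq, huh_min, hlst_max, hfold]
  simp only [gimme_alt]
  rw [hfc]
  simp only [hmeq]

-- ===== VERDICT (by name: the statement is the Claim_ definition above) =====
theorem gimme_spec : Claim_equal_gimme := by
  intro l _ hpre
  unfold Spec_gimme
  simp only [Pre_gimme, List.any_eq_true, Bool.and_eq_true, decide_eq_true_eq] at hpre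
  obtain ⟨v, hvl, ⟨a, hal, hav⟩, b, hbl, hvb⟩ := hpre
  cases l with
  | nil => cases hvl
  | cons h tl => exact gimme_main h tl v a b hvl hal hbl hav hvb
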